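-- pv_equiv track=rewrite | github.com/strugglehonor/leetcode | 动态规划/dungeon_game.py | calculateMinimumHPByDp
-- ===== SOURCE A (Python) =====
-- def calculateMinimumHPByDp(dungeon):
--     n, m = len(dungeon), len(dungeon[0])
--     # dp[i][j]表示从i, j出发可以救到公主的最小生命值
--     dp = [[0]*m for _ in range(n)]
--     dp[n-1][m-1] = max(-dungeon[n-1][m-1], 0)
--     # if dungeon[n-1][m-1] > 0:
--     #     dp[n-1][m-1] = 0
--     # else:
--     #     dp[n-1][m-1] = -dungeon[n-1][m-1]+1
--
--     for i in range(n-2,-1,-1):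
--         dp[i][-1] = max(0, dp[i+1][-1] - dungeon[i][-1])
--     for j in range(m-2,-1,-1):
--         dp[-1][j] = max(0, dp[-1][j+1] - dungeon[-1][j])
--
--     for i in range(n-2, -1, -1):
--         for j in range(m-2, -1, -1):
--             # right, bottom = _getValue(i-1, j, dp), _getValue(i, j-1, dp)
--             # needHP = min(right, bottom)-dungeon[i][j]
--             # dp[i][j] = needHP if needHP > 0 else 0
--             dp[i][j] = max(0, min(dp[i+1][j], dp[i][j+1]) - dungeon[i][j])
--
--     return dp[0][0]+1
-- ===== SOURCE B (Python) =====
-- def calculateMinimumHPByDp(dungeon):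
--     # Binary search on the initial HP; each candidate is checked by a forward
--     # max-HP simulation over the grid (genuinely different algorithm from the
--     # backward min-need DP).
--     n, m = len(dungeon), len(dungeon[0])
--
--     def feasible(x):
--         # best[j] = max HP attainable just after cell (i, j), or None if no
--         # surviving path reaches it
--         best = []
--         for i in range(n):
--             new = []
--             for j in range(m):
--                 if i == 0 and j == 0:
--                     cand = x
--                 else:
--                     cand = None
--                     if i > 0 and best[j] is not None:
--                         cand = best[j]
--                     if j > 0 and new[j - 1] is not None:
--                         if cand is None or new[j - 1] > cand:
--                             cand = new[j - 1]
--                 hp = None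
--                 if cand is not None:
--                     hp = cand + dungeon[i][j]
--                     if hp < 1:
--                         hp = None
--                 new.append(hp)
--             best = new
--         return best[m - 1] is not None
--
--     lo = 1
--     hi = 1
--     for row in dungeon:
--         for d in row:
--             if d < 0:
--                 hi -= d
--     while lo < hi:
--         mid = (lo + hi) // 2
--         if feasible(mid):
--             hi = mid
--         else:
--             lo = mid + 1
--     return lo
-- ===== Notes on version B (the rewrite author's own statement) =====
-- stated objective: alternative
-- what changed: Replaces A's backward min-need dynamic program (table with corner special-case and two edge loops) by binary search on the initial HP, each candidate checked by a forward maximum-HP simulation over the grid; correct because survivability is monotone in the starting HP and A's dp[0][0]+1 is exactly the least survivable start.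
-- outside the precondition, e.g. on calculateMinimumHPByDp([[0], [0, -5], [0]]): A returns 6, B returns 1
import Mathlib
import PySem

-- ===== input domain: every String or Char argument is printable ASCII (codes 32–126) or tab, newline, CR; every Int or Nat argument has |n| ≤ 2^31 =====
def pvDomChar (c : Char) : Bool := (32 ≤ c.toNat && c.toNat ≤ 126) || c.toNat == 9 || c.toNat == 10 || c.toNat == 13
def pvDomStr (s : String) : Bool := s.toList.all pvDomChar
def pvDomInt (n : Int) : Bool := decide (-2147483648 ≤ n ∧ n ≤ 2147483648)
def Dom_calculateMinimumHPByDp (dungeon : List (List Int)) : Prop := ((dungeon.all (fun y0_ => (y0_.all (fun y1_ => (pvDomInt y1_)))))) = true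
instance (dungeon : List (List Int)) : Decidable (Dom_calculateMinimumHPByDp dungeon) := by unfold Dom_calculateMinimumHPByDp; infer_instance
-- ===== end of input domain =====

-- B replaces A's backward min-need DP table by binary search on the initial HP with a forward
-- maximum-HP feasibility simulation per candidate: a genuinely different algorithm of similar size.


-- ===== PORT A =====
-- Literal transliteration of A. pyGetD/pySetD are the total forms of Python's indexing; on every
-- input admitted by Pre_calculateMinimumHPByDp all indices are in range, so they are exact there
-- (where Python raises IndexError, Pre_ excludes the input).
def calculateMinimumHPByDp (dungeon : List (List Int)) : Int :=
  let n : Int := dungeon.length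
  let m : Int := (PySem.List.pyGetD dungeon 0 []).length
  let dp : List (List Int) := List.replicate n.toNat (List.replicate m.toNat (0 : Int))
  let dp := PySem.List.pySetD dp (n-1)
    (PySem.List.pySetD (PySem.List.pyGetD dp (n-1) []) (m-1)
      (max (-(PySem.List.pyGetD (PySem.List.pyGetD dungeon (n-1) []) (m-1) 0)) 0))
  let dp := (PySem.List.pyRange (n-2) (-1) (-1)).foldl (fun dp i =>
      PySem.List.pySetD dp i (PySem.List.pySetD (PySem.List.pyGetD dp i []) (-1)
        (max 0 (PySem.List.pyGetD (PySem.List.pyGetD dp (i+1) []) (-1) 0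
                - PySem.List.pyGetD (PySem.List.pyGetD dungeon i []) (-1) 0)))) dp
  let dp := (PySem.List.pyRange (m-2) (-1) (-1)).foldl (fun dp j =>
      PySem.List.pySetD dp (-1) (PySem.List.pySetD (PySem.List.pyGetD dp (-1) []) j
        (max 0 (PySem.List.pyGetD (PySem.List.pyGetD dp (-1) []) (j+1) 0
                - PySem.List.pyGetD (PySem.List.pyGetD dungeon (-1) []) j 0)))) dp
  let dp := (PySem.List.pyRange (n-2) (-1) (-1)).foldl (fun dp i =>
      (PySem.List.pyRange (m-2) (-1) (-1)).foldl (fun dp j =>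
        PySem.List.pySetD dp i (PySem.List.pySetD (PySem.List.pyGetD dp i []) j
          (max 0 (min (PySem.List.pyGetD (PySem.List.pyGetD dp (i+1) []) j 0)
                      (PySem.List.pyGetD (PySem.List.pyGetD dp i []) (j+1) 0)
                  - PySem.List.pyGetD (PySem.List.pyGetD dungeon i []) j 0)))) dp) dp
  PySem.List.pyGetD (PySem.List.pyGetD dp 0 []) 0 0 + 1

-- ===== PORT B =====
-- Transliteration of Source B's `feasible(x)`: a forward sweep keeping the previous row's best
-- achievable HP values (`none` = unreachable alive); indexing via the total pyGetD forms,
-- exact on Pre_'s rectangular grids.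
def altCell (dungeon : List (List Int)) (x : Int) (best : List (Option Int)) (i : Int)
    (new : List (Option Int)) (j : Int) : List (Option Int) :=
  let cand : Option Int :=
    if i = 0 ∧ j = 0 then some x
    else
      let cand0 : Option Int := none
      let cand1 : Option Int :=
        if 0 < i then
          match PySem.List.pyGetD best j none with
          | some v => some v
          | none => cand0
        else cand0
      if 0 < j then
        match PySem.List.pyGetD new (j - 1) none with
        | some w =>
          match cand1 with
          | none => some w
          | some c => if c < w then some w else some c
        | none => cand1
      else cand1
  let hp : Option Int :=
    match cand with
    | none => none
    | some c =>
      let h := c + PySem.List.pyGetD (PySem.List.pyGetD dungeon i []) j 0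
      if h < 1 then none else some h
  new ++ [hp]

def altRow (dungeon : List (List Int)) (x : Int) (m : Int)
    (best : List (Option Int)) (i : Int) : List (Option Int) :=
  (PySem.List.pyRange 0 m 1).foldl (altCell dungeon x best i) []

def altFeasible (dungeon : List (List Int)) (n m : Int) (x : Int) : Bool :=
  let best := (PySem.List.pyRange 0 n 1).foldl (altRow dungeon x m) []
  (PySem.List.pyGetD best (m - 1) none).isSome

-- transliteration of Source B's `while lo < hi` binary-search loop
def altSearch (dungeon : List (List Int)) (n m lo hi : Int) : Int :=
  if h : lo < hi then
    let mid := PySem.Int.floordiv (lo + hi) 2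
    if altFeasible dungeon n m mid then altSearch dungeon n m lo mid
    else altSearch dungeon n m (mid + 1) hi
  else lo
termination_by (hi - lo).toNat
decreasing_by
  · have hb := PySem.Int.floordiv_two_mid_bounds (lo := lo) (hi := hi) (le_of_lt h)
    have hlt : PySem.Int.floordiv (lo + hi) 2 < hi :=
      (PySem.Int.floordiv_lt_iff_lt_mul (by omega)).2 (by omega)
    omega
  · have hb := PySem.Int.floordiv_two_mid_bounds (lo := lo) (hi := hi) (le_of_lt h)
    omega

def calculateMinimumHPByDp_alt (dungeon : List (List Int)) : Int :=
  let n : Int := dungeon.length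
  let m : Int := (PySem.List.pyGetD dungeon 0 []).length
  let lo : Int := 1
  let hi : Int := dungeon.foldl (fun hi row =>
      row.foldl (fun hi d => if d < 0 then hi - d else hi) hi) 1
  altSearch dungeon n m lo hi

-- ===== PRECONDITION & SPEC =====
-- Pre_ restricts to the natural domain of non-empty rectangular grids. Excluded: on an empty grid,
-- an empty first row, or rows shorter than the first A raises IndexError; on ragged grids with
-- longer rows A still returns, but its value mixes fixed-width indexing with each row's LAST
-- element (dungeon[i][-1]) — an accident of its implementation no caller of a grid function
-- would specify, and B reads row j-th entries instead.
def Pre_calculateMinimumHPByDp (dungeon : List (List Int)) : Prop :=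
  dungeon ≠ [] ∧ 1 ≤ (dungeon.headD []).length ∧
    ∀ r ∈ dungeon, r.length = (dungeon.headD []).length
instance (dungeon : List (List Int)) : Decidable (Pre_calculateMinimumHPByDp dungeon) := by
  unfold Pre_calculateMinimumHPByDp; infer_instance

def pvWitness_calculateMinimumHPByDp : List (List Int) := [[-3, 5], [1, -4]]

def Spec_calculateMinimumHPByDp (dungeon : List (List Int)) (out : Int) : Prop := out = calculateMinimumHPByDp_alt dungeon
instance (dungeon : List (List Int)) (out : Int) : Decidable (Spec_calculateMinimumHPByDp dungeon out) := by unfold Spec_calculateMinimumHPByDp; infer_instance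

-- ===== CLAIM (what is proved, stated in full; the proofs are below) =====
def Claim_equal_calculateMinimumHPByDp : Prop := ∀ (dungeon : List (List Int)), Dom_calculateMinimumHPByDp dungeon → Pre_calculateMinimumHPByDp dungeon → Spec_calculateMinimumHPByDp dungeon (calculateMinimumHPByDp dungeon)

-- ===== LEMMAS AND PROOFS =====

lemma headD_eq_getD {α : Type} (l : List α) (d : α) : l.headD d = l.getD 0 d := by
  cases l <;> rfl

def mOf (dg : List (List Int)) : Nat := (dg.headD []).length
def rowOf (dg : List (List Int)) (i : Nat) : List Int := dg.getD i []
def gOf (dg : List (List Int)) (i j : Nat) : Int := (rowOf dg i).getD j 0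

def Rect (dg : List (List Int)) : Prop :=
  dg ≠ [] ∧ 1 ≤ mOf dg ∧ ∀ r ∈ dg, r.length = mOf dg

-- minimum HP needed on entering cell (i, j) of an n×m grid (A's dp[i][j] + 1)
def need (dg : List (List Int)) (n m i j : Nat) : Int :=
  if _h : i + 1 < n then
    if _h2 : j + 1 < m then
      max 1 (min (need dg n m (i+1) j) (need dg n m i (j+1)) - gOf dg i j)
    else max 1 (need dg n m (i+1) j - gOf dg i j)
  else
    if _h2 : j + 1 < m then max 1 (need dg n m i (j+1) - gOf dg i j)
    else max 1 (1 - gOf dg i j)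
termination_by (n - i) + (m - j)
decreasing_by all_goals omega

def hpv (dg : List (List Int)) (i j : Nat) : Int := need dg dg.length (mOf dg) i j

lemma need_ge_one (dg : List (List Int)) (n m i j : Nat) : 1 ≤ need dg n m i j := by
  rw [need]; split_ifs <;> exact le_max_left _ _

lemma hpv_corner (dg : List (List Int)) (hP : Rect dg) :
    hpv dg (dg.length - 1) (mOf dg - 1) = max 1 (1 - gOf dg (dg.length - 1) (mOf dg - 1)) := by
  have h0 : 0 < dg.length := List.length_pos_iff.mpr hP.1
  have hm : 1 ≤ mOf dg := hP.2.1
  rw [hpv, need, dif_neg (by omega), dif_neg (by omega)]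

lemma hpv_lastrow (dg : List (List Int)) (hP : Rect dg) (j : Nat) (hj : j + 1 < mOf dg) :
    hpv dg (dg.length - 1) j = max 1 (hpv dg (dg.length - 1) (j+1) - gOf dg (dg.length - 1) j) := by
  have h0 : 0 < dg.length := List.length_pos_iff.mpr hP.1
  rw [hpv, need, dif_neg (by omega), dif_pos hj]; rfl

lemma hpv_lastcol (dg : List (List Int)) (hP : Rect dg) (i : Nat) (hi : i + 1 < dg.length) :
    hpv dg i (mOf dg - 1) = max 1 (hpv dg (i+1) (mOf dg - 1) - gOf dg i (mOf dg - 1)) := by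
  have hm : 1 ≤ mOf dg := hP.2.1
  rw [hpv, need, dif_pos hi, dif_neg (by omega)]; rfl

lemma hpv_interior (dg : List (List Int)) (hP : Rect dg) (i j : Nat)
    (hi : i + 1 < dg.length) (hj : j + 1 < mOf dg) :
    hpv dg i j = max 1 (min (hpv dg i (j+1)) (hpv dg (i+1) j) - gOf dg i j) := by
  rw [hpv, need, dif_pos hi, dif_pos hj, min_comm]; rfl

lemma rowOf_mem (dg : List (List Int)) (i : Nat) (hi : i < dg.length) : rowOf dg i ∈ dg := by
  unfold rowOf
  rw [List.getD_eq_getElem _ _ hi]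
  exact List.getElem_mem hi

lemma rowOf_length (dg : List (List Int)) (hP : Rect dg) (i : Nat) (hi : i < dg.length) :
    (rowOf dg i).length = mOf dg :=
  hP.2.2 _ (rowOf_mem dg i hi)

lemma pyGetD_toNat' {α : Type} (xs : List α) (i : Int) (d : α) (h0 : 0 ≤ i) :
    PySem.List.pyGetD xs i d = xs.getD i.toNat d := by
  simp only [PySem.List.pyGetD, PySem.List.pyGet?, PySem.List.pyIdx?, if_pos h0,
    List.getD_eq_getElem?_getD]
  split
  · next hlt => simp [List.getElem?_eq_getElem (by omega : i.toNat < xs.length)]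
  · next hge => simp [List.getElem?_eq_none (by omega : xs.length ≤ i.toNat)]

lemma pyGetD_negOne' {α : Type} (xs : List α) (d : α) (h : xs ≠ []) :
    PySem.List.pyGetD xs (-1) d = xs.getD (xs.length - 1) d := by
  have hl : 0 < xs.length := List.length_pos_iff.mpr h
  simp only [PySem.List.pyGetD, PySem.List.pyGet?, PySem.List.pyIdx?]
  rw [if_neg (by omega), if_pos (by omega : -(xs.length:Int) ≤ -1)]
  simp [List.getD_eq_getElem?_getD, List.getElem?_eq_getElem (by omega : xs.length - (1:Int).toNat < xs.length)]

lemma pySetD_negOne' {α : Type} (xs : List α) (v : α) (h : xs ≠ []) :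
    PySem.List.pySetD xs (-1) v = xs.set (xs.length - 1) v := by
  have hl : 0 < xs.length := List.length_pos_iff.mpr h
  simp only [PySem.List.pySetD, PySem.List.pySet?, PySem.List.pyIdx?]
  rw [if_neg (by omega), if_pos (by omega : -(xs.length:Int) ≤ -1)]
  rfl

lemma getD_set' {α : Type} (l : List α) (i i' : Nat) (a d : α) :
    (l.set i a).getD i' d = if i' = i ∧ i < l.length then a else l.getD i' d := by
  simp only [List.getD_eq_getElem?_getD, List.getElem?_set]
  split_ifs with h1 h2 h3 <;> simp_all

def GridInv (dp : List (List Int)) (n m : Nat) (f : Nat → Nat → Int) : Prop :=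
  dp.length = n ∧ ∀ i, i < n →
    (dp.getD i []).length = m ∧ ∀ j, j < m → (dp.getD i []).getD j 0 = f i j

lemma GridInv_congr {dp : List (List Int)} {n m : Nat} {f f' : Nat → Nat → Int}
    (h : GridInv dp n m f) (he : ∀ i, i < n → ∀ j, j < m → f i j = f' i j) :
    GridInv dp n m f' := by
  obtain ⟨h1, h2⟩ := h
  exact ⟨h1, fun i hi => ⟨(h2 i hi).1, fun j hj => ((h2 i hi).2 j hj).trans (he i hi j hj)⟩⟩

lemma GridInv_set {dp : List (List Int)} {n m : Nat} {f : Nat → Nat → Int}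
    (h : GridInv dp n m f) {i j : Nat} (hi : i < n) (hj : j < m) (v : Int) :
    GridInv (dp.set i ((dp.getD i []).set j v)) n m
      (fun i' j' => if i' = i ∧ j' = j then v else f i' j') := by
  obtain ⟨hlen, hrow⟩ := h
  refine ⟨by simp [hlen], fun i' hi' => ?_⟩
  rw [getD_set' dp i i' _ []]
  by_cases hii : i' = i
  · rw [if_pos ⟨hii, by omega⟩]
    have hl : (dp.getD i []).length = m := (hrow i hi).1
    refine ⟨by rw [List.length_set]; exact hl, fun j' hj' => ?_⟩
    rw [getD_set']
    by_cases hjj : j' = j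
    · rw [if_pos ⟨hjj, by omega⟩]
      simp [hii, hjj]
    · rw [if_neg (by tauto)]
      have hv := (hrow i hi).2 j' hj'
      simpa [hii, hjj] using hv
  · rw [if_neg (by tauto)]
    refine ⟨(hrow i' hi').1, fun j' hj' => ?_⟩
    have hv := (hrow i' hi').2 j' hj'
    simpa [hii] using hv

lemma GridInv_replicate (n m : Nat) :
    GridInv (List.replicate n (List.replicate m (0:Int))) n m (fun _ _ => 0) := by
  refine ⟨by simp, fun i hi => ?_⟩
  have h1 : (List.replicate n (List.replicate m (0:Int))).getD i [] = List.replicate m 0 := by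
    rw [List.getD_eq_getElem _ _ (by simpa using hi)]
    simp
  rw [h1]
  refine ⟨by simp, fun j hj => ?_⟩
  rw [List.getD_eq_getElem _ _ (by simpa using hj)]
  simp

lemma countdown_fold {σ : Type} (start : Int) (body : σ → Int → σ) (P : Int → σ → Prop)
    (hstep : ∀ (i : Int) (s : σ), 0 ≤ i → i ≤ start → P i s → P (i-1) (body s i)) :
    ∀ (k : Nat) (i : Int), (i + 1 = (k : Int)) → -1 ≤ i → i ≤ start → ∀ s, P i s →
      P (-1) ((PySem.List.pyRange i (-1) (-1)).foldl body s) := by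
  intro k
  induction k with
  | zero =>
      intro i hk h1 h2 s hP
      have : i = -1 := by omega
      subst this
      rw [PySem.List.pyRange_neg_one_eq_nil (by omega)]
      exact hP
  | succ k ih =>
      intro i hk h1 h2 s hP
      have h0 : 0 ≤ i := by omega
      rw [PySem.List.pyRange_neg_one_cons (by omega : (-1:Int) < i)]
      rw [List.foldl_cons]
      exact ih (i-1) (by omega) (by omega) (by omega) (body s i) (hstep i s h0 h2 hP)

def body1 (dg : List (List Int)) (dp : List (List Int)) (i : Int) : List (List Int) :=
  PySem.List.pySetD dp i (PySem.List.pySetD (PySem.List.pyGetD dp i []) (-1)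
    (max 0 (PySem.List.pyGetD (PySem.List.pyGetD dp (i+1) []) (-1) 0
            - PySem.List.pyGetD (PySem.List.pyGetD dg i []) (-1) 0)))

def body2 (dg : List (List Int)) (dp : List (List Int)) (j : Int) : List (List Int) :=
  PySem.List.pySetD dp (-1) (PySem.List.pySetD (PySem.List.pyGetD dp (-1) []) j
    (max 0 (PySem.List.pyGetD (PySem.List.pyGetD dp (-1) []) (j+1) 0
            - PySem.List.pyGetD (PySem.List.pyGetD dg (-1) []) j 0)))

def body3 (dg : List (List Int)) (i : Int) (dp : List (List Int)) (j : Int) : List (List Int) :=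
  PySem.List.pySetD dp i (PySem.List.pySetD (PySem.List.pyGetD dp i []) j
    (max 0 (min (PySem.List.pyGetD (PySem.List.pyGetD dp (i+1) []) j 0)
                (PySem.List.pyGetD (PySem.List.pyGetD dp i []) (j+1) 0)
            - PySem.List.pyGetD (PySem.List.pyGetD dg i []) j 0)))

def initDp (dg : List (List Int)) : List (List Int) :=
  PySem.List.pySetD (List.replicate (dg.length:Int).toNat (List.replicate ((PySem.List.pyGetD dg 0 []).length:Int).toNat (0:Int))) ((dg.length:Int)-1)
    (PySem.List.pySetD (PySem.List.pyGetD (List.replicate (dg.length:Int).toNat (List.replicate ((PySem.List.pyGetD dg 0 []).length:Int).toNat (0:Int))) ((dg.length:Int)-1) []) (((PySem.List.pyGetD dg 0 []).length:Int)-1)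
      (max (-(PySem.List.pyGetD (PySem.List.pyGetD dg ((dg.length:Int)-1) []) (((PySem.List.pyGetD dg 0 []).length:Int)-1) 0)) 0))

lemma A_eq (dg : List (List Int)) : calculateMinimumHPByDp dg =
    PySem.List.pyGetD (PySem.List.pyGetD (
      (PySem.List.pyRange ((dg.length:Int)-2) (-1) (-1)).foldl (fun dp i =>
        (PySem.List.pyRange (((PySem.List.pyGetD dg 0 []).length:Int)-2) (-1) (-1)).foldl (body3 dg i) dp)
      ((PySem.List.pyRange (((PySem.List.pyGetD dg 0 []).length:Int)-2) (-1) (-1)).foldl (body2 dg)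
        ((PySem.List.pyRange ((dg.length:Int)-2) (-1) (-1)).foldl (body1 dg) (initDp dg)))) 0 []) 0 0 + 1 := rfl

lemma mBridge (dg : List (List Int)) : (PySem.List.pyGetD dg 0 []).length = mOf dg := by
  rw [pyGetD_toNat' dg 0 [] (le_refl 0)]
  unfold mOf
  rw [headD_eq_getD]
  rfl

def f1 (dg : List (List Int)) (i : Int) : Nat → Nat → Int := fun i' j' =>
  if j' = mOf dg - 1 ∧ i < (i' : Int) then hpv dg i' (mOf dg - 1) - 1 else 0

lemma step1 (dg : List (List Int)) (hP : Rect dg) (i : Int) (s : List (List Int)) (h0 : 0 ≤ i)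
    (h2 : i ≤ (dg.length:Int) - 2) (hInv : GridInv s dg.length (mOf dg) (f1 dg i)) :
    GridInv (body1 dg s i) dg.length (mOf dg) (f1 dg (i-1)) := by
  have hm : 1 ≤ mOf dg := hP.2.1
  have hnn : 2 ≤ dg.length := by omega
  have hiN : i.toNat < dg.length - 1 := by omega
  have hieq : (i:Int) = (i.toNat : Int) := by omega
  have hki : (s.getD i.toNat []).length = mOf dg := (hInv.2 i.toNat (by omega)).1
  have hki1 : (s.getD (i.toNat+1) []).length = mOf dg := (hInv.2 (i.toNat+1) (by omega)).1
  have hdg : (dg.getD i.toNat []).length = mOf dg := rowOf_length dg hP i.toNat (by omega)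
  have ht1 : (i+1).toNat = i.toNat + 1 := by omega
  unfold body1
  rw [pyGetD_toNat' s i _ h0, pyGetD_toNat' s (i+1) _ (by omega), pyGetD_toNat' dg i _ h0, ht1]
  rw [pyGetD_negOne' _ _ (by intro h; rw [h] at hki1; simp at hki1; omega)]
  rw [pyGetD_negOne' _ _ (by intro h; rw [h] at hdg; simp at hdg; omega)]
  rw [pySetD_negOne' _ _ (by intro h; rw [h] at hki; simp at hki; omega)]
  rw [PySem.List.pySetD_of_nonneg s _ h0]
  rw [hki1, hdg, hki]
  have hv1 : (s.getD (i.toNat+1) []).getD (mOf dg - 1) 0 = hpv dg (i.toNat+1) (mOf dg - 1) - 1 := by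
    rw [(hInv.2 _ (by omega)).2 _ (by omega)]
    unfold f1
    rw [if_pos ⟨rfl, by omega⟩]
  have hg : (dg.getD i.toNat []).getD (mOf dg - 1) 0 = gOf dg i.toNat (mOf dg - 1) := rfl
  rw [hv1, hg]
  have hval : max 0 ((hpv dg (i.toNat+1) (mOf dg - 1) - 1) - gOf dg i.toNat (mOf dg - 1))
      = hpv dg i.toNat (mOf dg - 1) - 1 := by
    have := hpv_lastcol dg hP i.toNat (by omega)
    omega
  rw [hval]
  refine GridInv_congr (GridInv_set hInv (show i.toNat < dg.length by omega)
    (show mOf dg - 1 < mOf dg by omega) _) ?_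
  intro i' hi' j' hj'
  simp only [f1]
  by_cases hc : i' = i.toNat ∧ j' = mOf dg - 1
  · obtain ⟨h1', h2'⟩ := hc
    subst h1'; subst h2'
    rw [if_pos ⟨rfl, rfl⟩, if_pos ⟨rfl, by omega⟩]
  · rw [if_neg hc]
    by_cases hd : j' = mOf dg - 1 ∧ i < (i' : Int)
    · rw [if_pos hd, if_pos ⟨hd.1, by omega⟩]
    · rw [if_neg hd, if_neg ?_]
      rintro ⟨ha, hb⟩
      have hni : ¬ (i < (i':Int)) := fun hlt => hd ⟨ha, hlt⟩
      exact hc ⟨by omega, ha⟩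

def f2 (dg : List (List Int)) (j : Int) : Nat → Nat → Int := fun i' j' =>
  if j' = mOf dg - 1 then hpv dg i' (mOf dg - 1) - 1
  else if i' = dg.length - 1 ∧ j < (j' : Int) then hpv dg (dg.length - 1) j' - 1 else 0

lemma step2 (dg : List (List Int)) (hP : Rect dg) (j : Int) (s : List (List Int)) (h0 : 0 ≤ j)
    (h2 : j ≤ (mOf dg:Int) - 2) (hInv : GridInv s dg.length (mOf dg) (f2 dg j)) :
    GridInv (body2 dg s j) dg.length (mOf dg) (f2 dg (j-1)) := by
  have hn : 1 ≤ dg.length := by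
    have := List.length_pos_iff.mpr hP.1; omega
  have hmm : 2 ≤ mOf dg := by omega
  have hjN : j.toNat < mOf dg - 1 := by omega
  have hsl : s.length = dg.length := hInv.1
  have hsne : s ≠ [] := by intro h; rw [h] at hsl; simp at hsl; omega
  have hki : (s.getD (dg.length - 1) []).length = mOf dg := (hInv.2 (dg.length - 1) (by omega)).1
  have hdg : (dg.getD (dg.length - 1) []).length = mOf dg := rowOf_length dg hP _ (by omega)
  have ht1 : (j+1).toNat = j.toNat + 1 := by omega
  unfold body2
  rw [pyGetD_negOne' s _ hsne, hsl]
  rw [pyGetD_negOne' dg _ hP.1]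
  rw [pyGetD_toNat' _ (j+1) _ (by omega), pyGetD_toNat' _ j _ h0, ht1]
  rw [pySetD_negOne' s _ hsne, hsl]
  rw [PySem.List.pySetD_of_nonneg _ _ h0]
  have hv1 : (s.getD (dg.length - 1) []).getD (j.toNat+1) 0 = hpv dg (dg.length - 1) (j.toNat+1) - 1 := by
    rw [(hInv.2 _ (by omega)).2 _ (by omega)]
    simp only [f2, eq_self_iff_true, true_and]
    by_cases hc : j.toNat + 1 = mOf dg - 1
    · rw [if_pos hc, hc]
    · rw [if_neg hc, if_pos (by omega : j < ((j.toNat + 1 : Nat) : Int))]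
  have hg : (dg.getD (dg.length - 1) []).getD j.toNat 0 = gOf dg (dg.length - 1) j.toNat := rfl
  rw [hv1, hg]
  have hval : max 0 ((hpv dg (dg.length - 1) (j.toNat+1) - 1) - gOf dg (dg.length - 1) j.toNat)
      = hpv dg (dg.length - 1) j.toNat - 1 := by
    have := hpv_lastrow dg hP j.toNat (by omega)
    omega
  rw [hval]
  refine GridInv_congr (GridInv_set hInv (show dg.length - 1 < dg.length by omega)
    (show j.toNat < mOf dg by omega) _) ?_
  intro i' hi' j' hj'
  simp only [f2]
  by_cases hc : i' = dg.length - 1 ∧ j' = j.toNat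
  · obtain ⟨h1', h2'⟩ := hc
    rw [if_pos ⟨h1', h2'⟩, if_neg (by omega), if_pos ⟨h1', by omega⟩, h2']
  · rw [if_neg hc]
    by_cases he : j' = mOf dg - 1
    · rw [if_pos he, if_pos he]
    · rw [if_neg he, if_neg he]
      by_cases hd : i' = dg.length - 1 ∧ j < (j' : Int)
      · rw [if_pos hd, if_pos ⟨hd.1, by omega⟩]
      · rw [if_neg hd, if_neg ?_]
        rintro ⟨ha, hb⟩
        have hnj : ¬ (j < (j':Int)) := fun hlt => hd ⟨ha, hlt⟩
        exact hc ⟨ha, by omega⟩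

def F3 (dg : List (List Int)) (i : Int) : Nat → Nat → Int := fun i' j' =>
  if i < (i' : Int) ∨ j' = mOf dg - 1 then hpv dg i' j' - 1 else 0

def G3 (dg : List (List Int)) (i j : Int) : Nat → Nat → Int := fun i' j' =>
  if i < (i' : Int) ∨ j' = mOf dg - 1 ∨ ((i' : Int) = i ∧ j < (j' : Int)) then hpv dg i' j' - 1 else 0

lemma step3inner (dg : List (List Int)) (hP : Rect dg) (i j : Int) (s : List (List Int))
    (hi0 : 0 ≤ i) (hi2 : i ≤ (dg.length:Int) - 2) (hj0 : 0 ≤ j) (hj2 : j ≤ (mOf dg:Int) - 2)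
    (hInv : GridInv s dg.length (mOf dg) (G3 dg i j)) :
    GridInv (body3 dg i s j) dg.length (mOf dg) (G3 dg i (j-1)) := by
  have hnn : 2 ≤ dg.length := by omega
  have hmm : 2 ≤ mOf dg := by omega
  have hiN : i.toNat < dg.length - 1 := by omega
  have hjN : j.toNat < mOf dg - 1 := by omega
  have hti : (i+1).toNat = i.toNat + 1 := by omega
  have htj : (j+1).toNat = j.toNat + 1 := by omega
  unfold body3
  rw [pyGetD_toNat' s (i+1) [] (by omega)]
  rw [pyGetD_toNat' s i [] hi0]
  rw [pyGetD_toNat' dg i [] hi0]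
  rw [hti]
  rw [pyGetD_toNat' (s.getD (i.toNat+1) []) j 0 hj0]
  rw [pyGetD_toNat' (s.getD i.toNat []) (j+1) 0 (by omega), htj]
  rw [pyGetD_toNat' (dg.getD i.toNat []) j 0 hj0]
  rw [PySem.List.pySetD_of_nonneg (s.getD i.toNat []) _ hj0]
  rw [PySem.List.pySetD_of_nonneg s _ hi0]
  have hv1 : (s.getD (i.toNat+1) []).getD j.toNat 0 = hpv dg (i.toNat+1) j.toNat - 1 := by
    rw [(hInv.2 _ (by omega)).2 _ (by omega)]
    simp only [G3]
    rw [if_pos (Or.inl (by omega))]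
  have hv2 : (s.getD i.toNat []).getD (j.toNat+1) 0 = hpv dg i.toNat (j.toNat+1) - 1 := by
    rw [(hInv.2 _ (by omega)).2 _ (by omega)]
    simp only [G3]
    have hcnd : (i < ((i.toNat:Nat):Int) ∨ j.toNat + 1 = mOf dg - 1 ∨
        (((i.toNat:Nat):Int) = i ∧ j < ((j.toNat+1:Nat):Int))) := by
      by_cases hc : j.toNat + 1 = mOf dg - 1
      · exact Or.inr (Or.inl hc)
      · exact Or.inr (Or.inr ⟨by omega, by omega⟩)
    rw [if_pos hcnd]
  have hg3 : (dg.getD i.toNat []).getD j.toNat 0 = gOf dg i.toNat j.toNat := rfl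
  rw [hv1, hv2, hg3]
  have hval : max 0 (min (hpv dg (i.toNat+1) j.toNat - 1) (hpv dg i.toNat (j.toNat+1) - 1)
      - gOf dg i.toNat j.toNat) = hpv dg i.toNat j.toNat - 1 := by
    have := hpv_interior dg hP i.toNat j.toNat (by omega) (by omega)
    omega
  rw [hval]
  refine GridInv_congr (GridInv_set hInv (by omega) (by omega) _) ?_
  intro i' hi' j' hj'
  simp only [G3]
  by_cases hc : i' = i.toNat ∧ j' = j.toNat
  · obtain ⟨h1', h2'⟩ := hc
    rw [if_pos ⟨h1', h2'⟩, if_pos (Or.inr (Or.inr ⟨by omega, by omega⟩)), h1', h2']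
  · rw [if_neg hc]
    by_cases hd : (i < (i':Int) ∨ j' = mOf dg - 1 ∨ ((i':Int) = i ∧ j < (j':Int)))
    · have hd' : (i < (i':Int) ∨ j' = mOf dg - 1 ∨ ((i':Int) = i ∧ j - 1 < (j':Int))) := by
        rcases hd with h|h|⟨ha,hb⟩
        · exact Or.inl h
        · exact Or.inr (Or.inl h)
        · exact Or.inr (Or.inr ⟨ha, by omega⟩)
      rw [if_pos hd, if_pos hd']
    · rw [if_neg hd, if_neg ?_]
      rintro (h|h|⟨ha,hb⟩)
      · exact hd (Or.inl h)
      · exact hd (Or.inr (Or.inl h))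
      · have hnj : ¬ (j < (j':Int)) := fun hlt => hd (Or.inr (Or.inr ⟨ha, hlt⟩))
        exact hc ⟨by omega, by omega⟩

lemma step3outer (dg : List (List Int)) (hP : Rect dg) (i : Int) (s : List (List Int))
    (h0 : 0 ≤ i) (h2 : i ≤ (dg.length:Int) - 2)
    (hInv : GridInv s dg.length (mOf dg) (F3 dg i)) :
    GridInv ((PySem.List.pyRange ((mOf dg:Int)-2) (-1) (-1)).foldl (body3 dg i) s)
      dg.length (mOf dg) (F3 dg (i-1)) := by
  have hm : 1 ≤ mOf dg := hP.2.1
  have hin : GridInv s dg.length (mOf dg) (G3 dg i ((mOf dg:Int)-2)) := by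
    refine GridInv_congr hInv ?_
    intro i' hi' j' hj'
    simp only [F3, G3]
    by_cases hc : (i < (i':Int) ∨ j' = mOf dg - 1)
    · rw [if_pos hc, if_pos (Or.elim hc Or.inl (fun h => Or.inr (Or.inl h)))]
    · rw [if_neg hc, if_neg ?_]
      rintro (h|h|⟨ha,hb⟩)
      · exact hc (Or.inl h)
      · exact hc (Or.inr h)
      · exact hc (Or.inr (by omega))
  have hout := countdown_fold ((mOf dg:Int)-2) (body3 dg i)
    (fun j s => GridInv s dg.length (mOf dg) (G3 dg i j))
    (fun j s hj0 hj2 hPs => step3inner dg hP i j s h0 h2 hj0 hj2 hPs)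
    (mOf dg - 1) ((mOf dg:Int)-2) (by omega) (by omega) (le_refl _) s hin
  refine GridInv_congr hout ?_
  intro i' hi' j' hj'
  simp only [F3, G3]
  by_cases hc : ((i:Int) - 1 < (i':Int) ∨ j' = mOf dg - 1)
  · refine Eq.symm ?_
    rw [if_pos hc]
    refine Eq.symm ?_
    rcases hc with h|h
    · by_cases hlt : i < (i':Int)
      · rw [if_pos (Or.inl hlt)]
      · rw [if_pos (Or.inr (Or.inr ⟨by omega, by omega⟩))]
    · rw [if_pos (Or.inr (Or.inl h))]
  · rw [if_neg ?_, if_neg hc]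
    rintro (h|h|⟨ha,hb⟩)
    · exact hc (Or.inl (by omega))
    · exact hc (Or.inr h)
    · exact hc (Or.inl (by omega))

lemma init_inv (dg : List (List Int)) (hP : Rect dg) :
    GridInv (initDp dg) dg.length (mOf dg) (f1 dg ((dg.length:Int)-2)) := by
  have hn : 1 ≤ dg.length := by have := List.length_pos_iff.mpr hP.1; omega
  have hm : 1 ≤ mOf dg := hP.2.1
  unfold initDp
  rw [mBridge dg]
  have htn : ((dg.length:Int)).toNat = dg.length := by omega
  have htm : ((mOf dg:Int)).toNat = mOf dg := by omega
  have htn1 : ((dg.length:Int)-1).toNat = dg.length - 1 := by omega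
  have htm1 : ((mOf dg:Int)-1).toNat = mOf dg - 1 := by omega
  rw [htn, htm]
  rw [pyGetD_toNat' dg ((dg.length:Int)-1) [] (by omega), htn1]
  rw [pyGetD_toNat' (dg.getD (dg.length - 1) []) ((mOf dg:Int)-1) 0 (by omega), htm1]
  rw [pyGetD_toNat' (List.replicate dg.length (List.replicate (mOf dg) (0:Int))) ((dg.length:Int)-1) [] (by omega), htn1]
  rw [PySem.List.pySetD_of_nonneg ((List.replicate dg.length (List.replicate (mOf dg) (0:Int))).getD (dg.length - 1) []) _ (by omega : (0:Int) ≤ (mOf dg:Int)-1), htm1]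
  rw [PySem.List.pySetD_of_nonneg (List.replicate dg.length (List.replicate (mOf dg) (0:Int))) _ (by omega : (0:Int) ≤ (dg.length:Int)-1), htn1]
  refine GridInv_congr (GridInv_set (GridInv_replicate dg.length (mOf dg)) (by omega) (by omega) _) ?_
  intro i' hi' j' hj'
  simp only [f1]
  by_cases hc : i' = dg.length - 1 ∧ j' = mOf dg - 1
  · obtain ⟨h1', h2'⟩ := hc
    rw [if_pos ⟨h1', h2'⟩, if_pos ⟨h2', by omega⟩, h1']
    have hgg : (dg.getD (dg.length - 1) []).getD (mOf dg - 1) 0 = gOf dg (dg.length - 1) (mOf dg - 1) := rfl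
    rw [hgg]
    have := hpv_corner dg hP
    omega
  · rw [if_neg hc, if_neg ?_]
    rintro ⟨ha, hb⟩
    exact hc ⟨by omega, ha⟩

lemma if12 (dg : List (List Int)) (_hP : Rect dg) (s : List (List Int))
    (h : GridInv s dg.length (mOf dg) (f1 dg (-1))) :
    GridInv s dg.length (mOf dg) (f2 dg ((mOf dg:Int)-2)) := by
  refine GridInv_congr h ?_
  intro i' hi' j' hj'
  simp only [f1, f2]
  by_cases hc : j' = mOf dg - 1
  · rw [if_pos ⟨hc, by omega⟩, if_pos hc]
  · rw [if_neg (by tauto), if_neg hc, if_neg ?_]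
    rintro ⟨ha, hb⟩
    omega

lemma if23 (dg : List (List Int)) (_hP : Rect dg) (s : List (List Int))
    (h : GridInv s dg.length (mOf dg) (f2 dg (-1))) :
    GridInv s dg.length (mOf dg) (F3 dg ((dg.length:Int)-2)) := by
  refine GridInv_congr h ?_
  intro i' hi' j' hj'
  simp only [f2, F3]
  by_cases hc : j' = mOf dg - 1
  · rw [if_pos hc, if_pos (Or.inr hc), hc]
  · rw [if_neg hc]
    by_cases hd : i' = dg.length - 1
    · rw [if_pos ⟨hd, by omega⟩, if_pos (Or.inl (by omega)), hd]
    · rw [if_neg (by tauto), if_neg ?_]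
      rintro (ha|hb)
      · omega
      · exact hc hb

theorem A_val (dungeon : List (List Int)) (hP : Rect dungeon) :
    calculateMinimumHPByDp dungeon = hpv dungeon 0 0 := by
  have hn : 1 ≤ dungeon.length := by have := List.length_pos_iff.mpr hP.1; omega
  have hm : 1 ≤ mOf dungeon := hP.2.1
  rw [A_eq, mBridge dungeon]
  have h1 := countdown_fold ((dungeon.length:Int)-2) (body1 dungeon)
    (fun i s => GridInv s dungeon.length (mOf dungeon) (f1 dungeon i))
    (fun i s h0 h2 hPs => step1 dungeon hP i s h0 h2 hPs)
    (dungeon.length - 1) ((dungeon.length:Int)-2) (by omega) (by omega) (le_refl _)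
    (initDp dungeon) (init_inv dungeon hP)
  have h2 := countdown_fold ((mOf dungeon:Int)-2) (body2 dungeon)
    (fun j s => GridInv s dungeon.length (mOf dungeon) (f2 dungeon j))
    (fun j s h0 h2 hPs => step2 dungeon hP j s h0 h2 hPs)
    (mOf dungeon - 1) ((mOf dungeon:Int)-2) (by omega) (by omega) (le_refl _)
    _ (if12 dungeon hP _ h1)
  have h3 := countdown_fold ((dungeon.length:Int)-2)
    (fun dp i => (PySem.List.pyRange ((mOf dungeon:Int)-2) (-1) (-1)).foldl (body3 dungeon i) dp)
    (fun i s => GridInv s dungeon.length (mOf dungeon) (F3 dungeon i))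
    (fun i s h0 h2 hPs => step3outer dungeon hP i s h0 h2 hPs)
    (dungeon.length - 1) ((dungeon.length:Int)-2) (by omega) (by omega) (le_refl _)
    _ (if23 dungeon hP _ h2)
  rw [pyGetD_toNat' _ (0:Int) ([]:List Int) (le_refl 0)]
  rw [pyGetD_toNat' _ (0:Int) (0:Int) (le_refl 0)]
  simp only [Int.toNat_zero]
  rw [(h3.2 0 (by omega)).2 0 (by omega)]
  simp only [F3]
  rw [if_pos (Or.inl (by omega : (-1:Int) < ((0:Nat):Int)))]
  omega


-- ========== B side ==========

-- forward-DP spec: maximum HP attainable just after cell (i, j); none = no surviving path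
def mbest (dg : List (List Int)) (x : Int) (i j : Nat) : Option Int :=
  let cand : Option Int :=
    if i = 0 ∧ j = 0 then some x
    else
      let c1 : Option Int := if _h : 0 < i then mbest dg x (i-1) j else none
      let c2 : Option Int := if _h : 0 < j then mbest dg x i (j-1) else none
      match c1, c2 with
      | none, c2 => c2
      | some u, none => some u
      | some u, some v => some (max u v)
  match cand with
  | none => none
  | some c => if c + gOf dg i j < 1 then none else some (c + gOf dg i j)
termination_by i + j
decreasing_by all_goals omega

lemma gBridge (dg : List (List Int)) (i j : Nat) :
    PySem.List.pyGetD (PySem.List.pyGetD dg (i:Int) []) (j:Int) 0 = gOf dg i j := by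
  rw [PySem.List.pyGetD_natCast, PySem.List.pyGetD_natCast]; rfl

lemma altCell_val (dg : List (List Int)) (x : Int) (i j : Nat) (best new : List (Option Int))
    (hb : 0 < i → PySem.List.pyGetD best (j:Int) none = mbest dg x (i-1) j)
    (hn : 0 < j → PySem.List.pyGetD new ((j:Int) - 1) none = mbest dg x i (j-1)) :
    altCell dg x best (i:Int) new (j:Int) = new ++ [mbest dg x i j] := by
  rw [mbest]
  by_cases h00 : i = 0 ∧ j = 0
  · obtain ⟨h1, h2⟩ := h00
    subst h1; subst h2
    have hg00 : PySem.List.pyGetD (PySem.List.pyGetD dg 0 []) 0 0 = gOf dg 0 0 := by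
      simpa using gBridge dg 0 0
    simp only [altCell, Nat.cast_zero, and_self, if_true, hg00]
  · have c1 : ¬((i:Int) = 0 ∧ (j:Int) = 0) := by omega
    by_cases hi0 : 0 < i
    · by_cases hj0 : 0 < j
      · have c2 : (0 < (i:Int)) := by omega
        have c3 : (0 < (j:Int)) := by omega
        simp only [altCell, if_neg c1, if_pos c2, if_pos c3, if_neg h00,
          dif_pos hi0, dif_pos hj0, hb hi0, hn hj0, gBridge]
        cases hA : mbest dg x (i-1) j <;> cases hB : mbest dg x i (j-1)
        · rfl
        · rfl
        · rfl
        · rename_i u v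
          by_cases huv : u < v
          · simp only [if_pos huv, max_eq_right (le_of_lt huv)]
          · simp only [if_neg huv, max_eq_left (by omega : v ≤ u)]
      · have hj00 : j = 0 := by omega
        subst hj00
        have c2 : (0 < (i:Int)) := by omega
        have c3 : ¬(0 < ((0:Nat):Int)) := by omega
        simp only [altCell, if_neg c1, if_pos c2, if_neg c3, and_true,
          eq_false (show ¬(i = 0) by omega), if_false,
          dif_pos hi0, dif_neg (lt_irrefl 0), hb hi0, gBridge]
        cases hA : mbest dg x (i-1) 0 <;> rfl
    · have hi00 : i = 0 := by omega
      subst hi00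
      have hj0 : 0 < j := by omega
      have c2 : ¬(0 < ((0:Nat):Int)) := by omega
      have c3 : (0 < (j:Int)) := by omega
      simp only [altCell, if_neg c1, if_neg c2, if_pos c3, true_and,
        eq_false (show ¬(j = 0) by omega), if_false,
        dif_neg (lt_irrefl 0), dif_pos hj0, hn hj0, gBridge]
      cases hB : mbest dg x 0 (j-1) <;> rfl

lemma altRow_val (dg : List (List Int)) (x : Int) (m : Nat) (i : Nat) (best : List (Option Int))
    (hbest : 0 < i → best.length = m ∧ ∀ j < m, best.getD j none = mbest dg x (i-1) j) :
    (altRow dg x (m:Int) best (i:Int)).length = m ∧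
      ∀ j < m, (altRow dg x (m:Int) best (i:Int)).getD j none = mbest dg x i j := by
  unfold altRow
  suffices h : ∀ kk : Nat, kk ≤ m →
      ((PySem.List.pyRange 0 (kk:Int) 1).foldl (altCell dg x best (i:Int)) []).length = kk ∧
      ∀ j < kk, ((PySem.List.pyRange 0 (kk:Int) 1).foldl (altCell dg x best (i:Int)) []).getD j none
        = mbest dg x i j by
    obtain ⟨h1, h2⟩ := h m le_rfl
    exact ⟨h1, fun j hj => h2 j hj⟩
  intro kk
  induction kk with
  | zero =>
      intro _
      rw [PySem.List.pyRange_one_eq_nil (by omega)]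
      simp
  | succ kk ih =>
      intro hkk
      obtain ⟨hlen, hent⟩ := ih (by omega)
      have hsplit : PySem.List.pyRange 0 ((kk+1:Nat):Int) 1
          = PySem.List.pyRange 0 (kk:Int) 1 ++ [(kk:Int)] := by
        have hc : ((kk+1:Nat):Int) = (kk:Int) + 1 := by push_cast; ring
        rw [hc, PySem.List.pyRange_one_succ_right (by omega)]
      rw [hsplit, List.foldl_append, List.foldl_cons, List.foldl_nil]
      rw [altCell_val dg x i kk best _
        (fun hi0 => by rw [PySem.List.pyGetD_natCast]; exact (hbest hi0).2 kk (by omega))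
        (fun hk0 => by
          have hc : ((kk:Int) - 1) = ((kk-1:Nat):Int) := by omega
          rw [hc, PySem.List.pyGetD_natCast]
          exact hent (kk-1) (by omega))]
      refine ⟨by simp [hlen], fun j hj => ?_⟩
      by_cases hjk : j < kk
      · rw [List.getD_eq_getElem?_getD, List.getElem?_append_left (by omega),
            ← List.getD_eq_getElem?_getD]
        exact hent j hjk
      · have hjkk : j = kk := by omega
        subst hjkk
        rw [List.getD_eq_getElem?_getD, List.getElem?_append_right (by omega)]
        simp [hlen]

lemma altFeasible_mbest (dg : List (List Int)) (x : Int) (n m : Nat)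
    (hn : 1 ≤ n) (hm : 1 ≤ m) :
    altFeasible dg (n:Int) (m:Int) x = (mbest dg x (n-1) (m-1)).isSome := by
  show (PySem.List.pyGetD ((PySem.List.pyRange 0 (n:Int) 1).foldl (altRow dg x (m:Int)) [])
      ((m:Int) - 1) none).isSome = (mbest dg x (n-1) (m-1)).isSome
  suffices h : ∀ kk : Nat, kk ≤ n → 0 < kk →
      ((PySem.List.pyRange 0 (kk:Int) 1).foldl (altRow dg x (m:Int)) []).length = m ∧
      ∀ j < m, ((PySem.List.pyRange 0 (kk:Int) 1).foldl (altRow dg x (m:Int)) []).getD j none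
        = mbest dg x (kk-1) j by
    obtain ⟨hlen, hent⟩ := h n le_rfl (by omega)
    have hm1 : ((m:Int) - 1) = ((m-1:Nat):Int) := by omega
    rw [hm1, PySem.List.pyGetD_natCast, hent (m-1) (by omega)]
  intro kk
  induction kk with
  | zero => intro _ h0; omega
  | succ kk ih =>
      intro hkk _
      have hsplit : PySem.List.pyRange 0 ((kk+1:Nat):Int) 1
          = PySem.List.pyRange 0 (kk:Int) 1 ++ [(kk:Int)] := by
        have hc : ((kk+1:Nat):Int) = (kk:Int) + 1 := by push_cast; ring
        rw [hc, PySem.List.pyRange_one_succ_right (by omega)]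
      rw [hsplit, List.foldl_append, List.foldl_cons, List.foldl_nil]
      have hrow := altRow_val dg x m kk
        ((PySem.List.pyRange 0 (kk:Int) 1).foldl (altRow dg x (m:Int)) [])
        (fun h0kk => ⟨(ih (by omega) h0kk).1, (ih (by omega) h0kk).2⟩)
      exact ⟨hrow.1, fun j hj => by simpa using hrow.2 j hj⟩

-- "some surviving path from (0,0) reaches cell (i, j) with HP exactly v after the cell"
def RpV (dg : List (List Int)) (x : Int) (i j : Nat) (v : Int) : Prop :=
  1 ≤ v ∧
    (if i = 0 ∧ j = 0 then v = x + gOf dg 0 0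
     else ∃ u, ((if _h : 0 < i then RpV dg x (i-1) j u else False) ∨
                (if _h : 0 < j then RpV dg x i (j-1) u else False)) ∧ v = u + gOf dg i j)
termination_by i + j
decreasing_by all_goals omega

lemma RpV_pos (dg : List (List Int)) (x : Int) (i j : Nat) (v : Int)
    (h : RpV dg x i j v) : 1 ≤ v := by rw [RpV] at h; exact h.1

-- one step of the forward DP against the path predicates of its two predecessors
lemma step_core (g : Int) (P1 P2 : Int → Prop) (c1 c2 : Option Int)
    (h1a : ∀ v, c1 = some v → P1 v)
    (h1b : ∀ v w, c1 = some v → P1 w → w ≤ v)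
    (h1c : c1 = none → ∀ w, ¬ P1 w)
    (h2a : ∀ v, c2 = some v → P2 v)
    (h2b : ∀ v w, c2 = some v → P2 w → w ≤ v)
    (h2c : c2 = none → ∀ w, ¬ P2 w) :
    (∀ v, (match (match c1, c2 with
            | none, c2 => c2
            | some u, none => some u
            | some u, some v => some (max u v)) with
          | none => none
          | some c => if c + g < 1 then none else some (c + g)) = some v →
        (1 ≤ v ∧ ∃ u, (P1 u ∨ P2 u) ∧ v = u + g)) ∧
    (∀ v w, (match (match c1, c2 with
            | none, c2 => c2
            | some u, none => some u
            | some u, some v => some (max u v)) with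
          | none => none
          | some c => if c + g < 1 then none else some (c + g)) = some v →
        (1 ≤ w ∧ ∃ u, (P1 u ∨ P2 u) ∧ w = u + g) → w ≤ v) ∧
    ((match (match c1, c2 with
            | none, c2 => c2
            | some u, none => some u
            | some u, some v => some (max u v)) with
          | none => none
          | some c => if c + g < 1 then none else some (c + g)) = none →
        ∀ w, ¬ (1 ≤ w ∧ ∃ u, (P1 u ∨ P2 u) ∧ w = u + g)) := by
  cases c1 with
  | none =>
    cases c2 with
    | none =>
        refine ⟨by simp, by simp, ?_⟩
        rintro _ w ⟨hw1, u, hu, rfl⟩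
        rcases hu with hu | hu
        · exact h1c rfl u hu
        · exact h2c rfl u hu
    | some b =>
        dsimp only
        refine ⟨?_, ?_, ?_⟩
        · intro v hv
          split_ifs at hv with hcb
          have hvb : b + g = v := by injection hv
          exact ⟨by omega, b, Or.inr (h2a b rfl), by omega⟩
        · rintro v w hv ⟨hw1, u, hu, rfl⟩
          split_ifs at hv with hcb
          have hvb : b + g = v := by injection hv
          rcases hu with hu | hu
          · exact absurd hu (h1c rfl u)
          · have := h2b b u rfl hu
            omega
        · rintro hv _ ⟨hw1, u, hu, rfl⟩
          split_ifs at hv with hcb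
          rcases hu with hu | hu
          · exact h1c rfl u hu
          · have := h2b b u rfl hu
            omega
  | some a =>
    cases c2 with
    | none =>
        dsimp only
        refine ⟨?_, ?_, ?_⟩
        · intro v hv
          split_ifs at hv with hca
          have hva : a + g = v := by injection hv
          exact ⟨by omega, a, Or.inl (h1a a rfl), by omega⟩
        · rintro v w hv ⟨hw1, u, hu, rfl⟩
          split_ifs at hv with hca
          have hva : a + g = v := by injection hv
          rcases hu with hu | hu
          · have := h1b a u rfl hu
            omega
          · exact absurd hu (h2c rfl u)
        · rintro hv _ ⟨hw1, u, hu, rfl⟩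
          split_ifs at hv with hca
          rcases hu with hu | hu
          · have := h1b a u rfl hu
            omega
          · exact h2c rfl u hu
    | some b =>
        have hmax : max a b = a ∨ max a b = b := by
          rcases le_total a b with h | h
          · exact Or.inr (max_eq_right h)
          · exact Or.inl (max_eq_left h)
        dsimp only
        refine ⟨?_, ?_, ?_⟩
        · intro v hv
          split_ifs at hv with hcm
          have hvm : max a b + g = v := by injection hv
          rcases hmax with hm | hm
          · exact ⟨by omega, a, Or.inl (h1a a rfl), by omega⟩
          · exact ⟨by omega, b, Or.inr (h2a b rfl), by omega⟩
        · rintro v w hv ⟨hw1, u, hu, rfl⟩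
          split_ifs at hv with hcm
          have hvm : max a b + g = v := by injection hv
          have hle : u ≤ max a b := by
            rcases hu with hu | hu
            · have := h1b a u rfl hu
              have := le_max_left a b
              omega
            · have := h2b b u rfl hu
              have := le_max_right a b
              omega
          omega
        · rintro hv _ ⟨hw1, u, hu, rfl⟩
          split_ifs at hv with hcm
          have hle : u ≤ max a b := by
            rcases hu with hu | hu
            · have := h1b a u rfl hu
              have := le_max_left a b
              omega
            · have := h2b b u rfl hu
              have := le_max_right a b
              omega
          omega

-- the forward DP computes exactly the maximum RpV value (none = no such path)
lemma mbest_spec (dg : List (List Int)) (x : Int) : ∀ (k : Nat) (i j : Nat), i + j = k →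
    (∀ v, mbest dg x i j = some v → RpV dg x i j v) ∧
    (∀ v w, mbest dg x i j = some v → RpV dg x i j w → w ≤ v) ∧
    (mbest dg x i j = none → ∀ w, ¬ RpV dg x i j w) := by
  intro k
  induction k using Nat.strong_induction_on with
  | _ k IH =>
    intro i j hk
    by_cases h00 : i = 0 ∧ j = 0
    · obtain ⟨h1, h2⟩ := h00; subst h1; subst h2
      have hm0 : mbest dg x 0 0
          = if x + gOf dg 0 0 < 1 then none else some (x + gOf dg 0 0) := by
        rw [mbest]
        simp
      have hr0 : ∀ w, RpV dg x 0 0 w ↔ (1 ≤ w ∧ w = x + gOf dg 0 0) := by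
        intro w; rw [RpV]; simp
      refine ⟨?_, ?_, ?_⟩
      · intro v hv
        rw [hm0] at hv
        split_ifs at hv with hc
        rw [hr0]
        have : x + gOf dg 0 0 = v := by injection hv
        omega
      · intro v w hv hw
        rw [hm0] at hv
        rw [hr0] at hw
        split_ifs at hv with hc
        have : x + gOf dg 0 0 = v := by injection hv
        omega
      · intro hnone w hw
        rw [hm0] at hnone
        rw [hr0] at hw
        split_ifs at hnone with hc
        omega
    · have hmb : mbest dg x i j =
          (match (match (if _h : 0 < i then mbest dg x (i-1) j else none),
                        (if _h : 0 < j then mbest dg x i (j-1) else none) with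
            | none, c2 => c2
            | some u, none => some u
            | some u, some v => some (max u v)) with
          | none => none
          | some c => if c + gOf dg i j < 1 then none else some (c + gOf dg i j)) := by
        rw [mbest, if_neg h00]
      have hrv : ∀ w, RpV dg x i j w ↔ (1 ≤ w ∧ ∃ u,
          ((if _h : 0 < i then RpV dg x (i-1) j u else False) ∨
           (if _h : 0 < j then RpV dg x i (j-1) u else False)) ∧ w = u + gOf dg i j) := by
        intro w; rw [RpV, if_neg h00]
      have hcore := step_core (gOf dg i j)
        (fun u => if _h : 0 < i then RpV dg x (i-1) j u else False)
        (fun u => if _h : 0 < j then RpV dg x i (j-1) u else False)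
        (if _h : 0 < i then mbest dg x (i-1) j else none)
        (if _h : 0 < j then mbest dg x i (j-1) else none)
        ?_ ?_ ?_ ?_ ?_ ?_
      · refine ⟨?_, ?_, ?_⟩
        · intro v hv
          rw [hmb] at hv
          rw [hrv]
          exact hcore.1 v hv
        · intro v w hv hw
          rw [hmb] at hv
          exact hcore.2.1 v w hv ((hrv w).mp hw)
        · intro hnone w hw
          rw [hmb] at hnone
          exact hcore.2.2 hnone w ((hrv w).mp hw)
      · intro v hv
        by_cases hi0 : 0 < i
        · rw [dif_pos hi0] at hv ⊢
          exact (IH ((i-1)+j) (by omega) (i-1) j rfl).1 v hv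
        · rw [dif_neg hi0] at hv
          exact absurd hv (by simp)
      · intro v w hv hw
        by_cases hi0 : 0 < i
        · rw [dif_pos hi0] at hv hw
          exact (IH ((i-1)+j) (by omega) (i-1) j rfl).2.1 v w hv hw
        · rw [dif_neg hi0] at hw
          exact absurd hw (by simp)
      · intro hnone w hw
        by_cases hi0 : 0 < i
        · rw [dif_pos hi0] at hnone hw
          exact (IH ((i-1)+j) (by omega) (i-1) j rfl).2.2 hnone w hw
        · rw [dif_neg hi0] at hw
          exact hw
      · intro v hv
        by_cases hj0 : 0 < j
        · rw [dif_pos hj0] at hv ⊢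
          exact (IH (i+(j-1)) (by omega) i (j-1) rfl).1 v hv
        · rw [dif_neg hj0] at hv
          exact absurd hv (by simp)
      · intro v w hv hw
        by_cases hj0 : 0 < j
        · rw [dif_pos hj0] at hv hw
          exact (IH (i+(j-1)) (by omega) i (j-1) rfl).2.1 v w hv hw
        · rw [dif_neg hj0] at hw
          exact absurd hw (by simp)
      · intro hnone w hw
        by_cases hj0 : 0 < j
        · rw [dif_pos hj0] at hnone hw
          exact (IH (i+(j-1)) (by omega) i (j-1) rfl).2.2 hnone w hw
        · rw [dif_neg hj0] at hw
          exact hw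

-- HP needed after leaving cell (i, j): the minimum over the next cells
def needAfter (dg : List (List Int)) (i j : Nat) : Int :=
  if i + 1 < dg.length then
    (if j + 1 < mOf dg then min (hpv dg (i+1) j) (hpv dg i (j+1)) else hpv dg (i+1) j)
  else (if j + 1 < mOf dg then hpv dg i (j+1) else 1)

lemma hpv_eq_needAfter (dg : List (List Int)) (i j : Nat) :
    hpv dg i j = max 1 (needAfter dg i j - gOf dg i j) := by
  rw [hpv, need]; unfold needAfter
  split_ifs <;> rfl

lemma needAfter_ge_one (dg : List (List Int)) (i j : Nat) : 1 ≤ needAfter dg i j := by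
  unfold needAfter
  split_ifs <;> simp [le_min_iff, need_ge_one, hpv]

-- soundness: a surviving path with enough HP to finish witnesses x ≥ hpv 0 0
lemma RpV_sound (dg : List (List Int)) (x : Int) (hP : Rect dg) (hx : 1 ≤ x) :
    ∀ (k i j : Nat) (v : Int), i + j = k → i < dg.length → j < mOf dg →
      RpV dg x i j v → needAfter dg i j ≤ v → hpv dg 0 0 ≤ x := by
  intro k
  induction k using Nat.strong_induction_on with
  | _ k IH =>
    intro i j v hk hi hj hR hNA
    rw [RpV] at hR
    obtain ⟨hv1, hrest⟩ := hR
    by_cases h00 : i = 0 ∧ j = 0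
    · rw [if_pos h00] at hrest
      obtain ⟨hi0, hj0⟩ := h00
      subst hi0; subst hj0
      have heq := hpv_eq_needAfter dg 0 0
      rw [heq]
      apply max_le
      · omega
      · omega
    · rw [if_neg h00] at hrest
      obtain ⟨u, hpred, hveq⟩ := hrest
      have hhij := hpv_eq_needAfter dg i j
      rcases hpred with hp | hp
      · by_cases hi0 : 0 < i
        swap
        · rw [dif_neg hi0] at hp
          exact hp.elim
        rw [dif_pos hi0] at hp
        have hu1 : 1 ≤ u := RpV_pos _ _ _ _ _ hp
        have hun : hpv dg i j ≤ u := by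
          rw [hhij]
          apply max_le
          · omega
          · omega
        have hna : needAfter dg (i-1) j ≤ hpv dg i j := by
          have hii : (i-1)+1 = i := by omega
          unfold needAfter
          rw [if_pos (show (i-1)+1 < dg.length by omega)]
          split_ifs with h2
          · rw [hii]
            exact min_le_left _ _
          · rw [hii]
        exact IH (k-1) (by omega) (i-1) j u (by omega) (by omega) hj hp (by omega)
      · by_cases hj0 : 0 < j
        swap
        · rw [dif_neg hj0] at hp
          exact hp.elim
        rw [dif_pos hj0] at hp
        have hu1 : 1 ≤ u := RpV_pos _ _ _ _ _ hp
        have hun : hpv dg i j ≤ u := by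
          rw [hhij]
          apply max_le
          · omega
          · omega
        have hna : needAfter dg i (j-1) ≤ hpv dg i j := by
          have hjj : (j-1)+1 = j := by omega
          unfold needAfter
          split_ifs with h1 h2 h3
          · rw [hjj]
            exact min_le_right _ _
          · omega
          · rw [hjj]
          · omega
        exact IH (k-1) (by omega) i (j-1) u (by omega) hi (by omega) hp (by omega)

-- completeness: from any on-track cell a surviving path reaches the princess
lemma RpV_complete (dg : List (List Int)) (x : Int) (hP : Rect dg) :
    ∀ (k i j : Nat) (v : Int), (dg.length - 1 - i) + (mOf dg - 1 - j) = k →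
      i < dg.length → j < mOf dg → RpV dg x i j v → needAfter dg i j ≤ v →
      ∃ w, RpV dg x (dg.length - 1) (mOf dg - 1) w := by
  intro k
  induction k using Nat.strong_induction_on with
  | _ k IH =>
    intro i j v hk hi hj hR hNA
    by_cases hend : i = dg.length - 1 ∧ j = mOf dg - 1
    · exact ⟨v, hend.1 ▸ hend.2 ▸ hR⟩
    · have hn1 : 0 < dg.length := by omega
      have hm1 : 0 < mOf dg := hP.2.1
      have hchild : ∃ ci cj : Nat, (ci = i + 1 ∧ cj = j ∨ ci = i ∧ cj = j + 1) ∧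
          ci < dg.length ∧ cj < mOf dg ∧ hpv dg ci cj ≤ needAfter dg i j := by
        unfold needAfter
        by_cases h1 : i + 1 < dg.length
        · by_cases h2 : j + 1 < mOf dg
          · rw [if_pos h1, if_pos h2]
            rcases le_total (hpv dg (i+1) j) (hpv dg i (j+1)) with h | h
            · exact ⟨i+1, j, Or.inl ⟨rfl, rfl⟩, h1, hj, by rw [min_eq_left h]⟩
            · exact ⟨i, j+1, Or.inr ⟨rfl, rfl⟩, hi, h2, by rw [min_eq_right h]⟩
          · rw [if_pos h1, if_neg h2]
            exact ⟨i+1, j, Or.inl ⟨rfl, rfl⟩, h1, hj, le_refl _⟩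
        · by_cases h2 : j + 1 < mOf dg
          · rw [if_neg h1, if_pos h2]
            exact ⟨i, j+1, Or.inr ⟨rfl, rfl⟩, hi, h2, le_refl _⟩
          · exact absurd ⟨by omega, by omega⟩ hend
      obtain ⟨ci, cj, hcase, hci, hcj, hcle⟩ := hchild
      have hv1 : 1 ≤ v := RpV_pos _ _ _ _ _ hR
      have hvc : hpv dg ci cj ≤ v := le_trans hcle hNA
      have heqc := hpv_eq_needAfter dg ci cj
      have hnac : 1 ≤ needAfter dg ci cj := needAfter_ge_one dg ci cj
      have hgap : needAfter dg ci cj - gOf dg ci cj ≤ hpv dg ci cj := by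
        rw [heqc]
        exact le_max_right _ _
      have hv'na : needAfter dg ci cj ≤ v + gOf dg ci cj := by omega
      have hv'1 : 1 ≤ v + gOf dg ci cj := by omega
      have hRc : RpV dg x ci cj (v + gOf dg ci cj) := by
        rw [RpV]
        refine ⟨hv'1, ?_⟩
        rcases hcase with ⟨hci', hcj'⟩ | ⟨hci', hcj'⟩
        · rw [hci', hcj']
          rw [if_neg (by omega : ¬(i + 1 = 0 ∧ j = 0))]
          exact ⟨v, Or.inl (by rw [dif_pos (by omega : 0 < i + 1)]; simpa using hR), rfl⟩
        · rw [hci', hcj']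
          rw [if_neg (by omega : ¬(i = 0 ∧ j + 1 = 0))]
          exact ⟨v, Or.inr (by rw [dif_pos (by omega : 0 < j + 1)]; simpa using hR), rfl⟩
      exact IH (dg.length - 1 - ci + (mOf dg - 1 - cj))
        (by rcases hcase with ⟨h1, h2⟩ | ⟨h1, h2⟩ <;> omega)
        ci cj (v + gOf dg ci cj) rfl hci hcj hRc hv'na

lemma feas_iff (dg : List (List Int)) (x : Int) (hP : Rect dg) (hx : 1 ≤ x) :
    (altFeasible dg (dg.length:Int) (mOf dg:Int) x = true ↔ hpv dg 0 0 ≤ x) := by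
  have hn : 1 ≤ dg.length := by have := List.length_pos_iff.mpr hP.1; omega
  have hm : 1 ≤ mOf dg := hP.2.1
  rw [altFeasible_mbest dg x dg.length (mOf dg) hn hm]
  constructor
  · intro hs
    obtain ⟨v, hv⟩ := Option.isSome_iff_exists.mp hs
    have hR := (mbest_spec dg x ((dg.length-1)+(mOf dg-1)) _ _ rfl).1 v hv
    have hv1 : 1 ≤ v := RpV_pos _ _ _ _ _ hR
    have hNAend : needAfter dg (dg.length-1) (mOf dg-1) = 1 := by
      unfold needAfter
      rw [if_neg (by omega), if_neg (by omega)]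
    exact RpV_sound dg x hP hx ((dg.length-1)+(mOf dg-1)) _ _ v rfl (by omega) (by omega) hR
      (by omega)
  · intro hge
    have h1 : 1 ≤ hpv dg 0 0 := need_ge_one _ _ _ _ _
    have hna1 := needAfter_ge_one dg 0 0
    have h2 : needAfter dg 0 0 - gOf dg 0 0 ≤ hpv dg 0 0 := by
      rw [hpv_eq_needAfter dg 0 0]
      exact le_max_right _ _
    have hseed : RpV dg x 0 0 (x + gOf dg 0 0) := by
      rw [RpV]
      refine ⟨by omega, ?_⟩
      rw [if_pos ⟨rfl, rfl⟩]
    have hx0 : needAfter dg 0 0 ≤ x + gOf dg 0 0 := by omega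
    obtain ⟨w, hw⟩ := RpV_complete dg x hP ((dg.length - 1 - 0) + (mOf dg - 1 - 0)) 0 0
      (x + gOf dg 0 0) rfl (by omega) (by omega) hseed hx0
    cases hmb : mbest dg x (dg.length-1) (mOf dg-1) with
    | none => exact absurd hw ((mbest_spec dg x ((dg.length-1)+(mOf dg-1)) _ _ rfl).2.2 hmb w)
    | some _ => simp

-- ===== upper bound: hpv 0 0 ≤ 1 + total damage =====
def loss (r : List Int) : Int := (r.map (fun d => max 0 (-d))).sum
def Ssum (l : List (List Int)) (j : Nat) : Int := (l.map (fun r => loss (r.drop j))).sum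

lemma loss_nonneg (r : List Int) : 0 ≤ loss r := by
  apply List.sum_nonneg; intro a ha
  simp only [List.mem_map] at ha
  obtain ⟨d, _, rfl⟩ := ha
  exact le_max_left _ _

lemma Ssum_nonneg (l : List (List Int)) (j : Nat) : 0 ≤ Ssum l j := by
  apply List.sum_nonneg; intro a ha
  simp only [List.mem_map] at ha
  obtain ⟨r, _, rfl⟩ := ha
  exact loss_nonneg _

lemma loss_drop (r : List Int) (j : Nat) (hj : j < r.length) :
    loss (r.drop j) = max 0 (-r.getD j 0) + loss (r.drop (j+1)) := by
  unfold loss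
  rw [List.drop_eq_getElem_cons hj, List.map_cons, List.sum_cons, List.getD_eq_getElem _ _ hj]

lemma loss_drop_le (r : List Int) (j : Nat) : loss (r.drop (j+1)) ≤ loss (r.drop j) := by
  by_cases hj : j < r.length
  · rw [loss_drop r j hj]
    have := le_max_left (0:Int) (-r.getD j 0)
    omega
  · rw [List.drop_eq_nil_of_le (by omega), List.drop_eq_nil_of_le (by omega)]

lemma Ssum_mono (l : List (List Int)) (j : Nat) : Ssum l (j+1) ≤ Ssum l j := by
  apply List.sum_le_sum
  intro r _
  exact loss_drop_le r j

lemma Ssum_cons (r : List Int) (l : List (List Int)) (j : Nat) :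
    Ssum (r :: l) j = loss (r.drop j) + Ssum l j := by
  simp [Ssum]

lemma hpv_bound (dg : List (List Int)) (hP : Rect dg) :
    ∀ (k i j : Nat), (dg.length - i) + (mOf dg - j) = k → i < dg.length → j < mOf dg →
      hpv dg i j ≤ 1 + Ssum (dg.drop i) j := by
  intro k
  induction k using Nat.strong_induction_on with
  | _ k IH =>
    intro i j hk hi hj
    have hrl : (rowOf dg i).length = mOf dg := rowOf_length dg hP i hi
    have hdropi : dg.drop i = rowOf dg i :: dg.drop (i+1) := by
      rw [List.drop_eq_getElem_cons hi]
      congr 1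
      unfold rowOf
      rw [List.getD_eq_getElem _ _ hi]
    have hS : Ssum (dg.drop i) j = loss ((rowOf dg i).drop j) + Ssum (dg.drop (i+1)) j := by
      rw [hdropi, Ssum_cons]
    have hld : loss ((rowOf dg i).drop j) = max 0 (-gOf dg i j) + loss ((rowOf dg i).drop (j+1)) :=
      loss_drop _ j (by omega)
    have hg0 : -gOf dg i j ≤ max 0 (-gOf dg i j) := le_max_right _ _
    have hg1 : (0:Int) ≤ max 0 (-gOf dg i j) := le_max_left _ _
    have hl0 : 0 ≤ loss ((rowOf dg i).drop (j+1)) := loss_nonneg _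
    have hs0 : 0 ≤ Ssum (dg.drop (i+1)) j := Ssum_nonneg _ _
    rw [hpv_eq_needAfter, max_le_iff]
    unfold needAfter
    split_ifs with hc1 hc2 hc3
    · -- interior: use the (i+1, j) child
      have hIH := IH (dg.length - (i+1) + (mOf dg - j)) (by omega) (i+1) j rfl (by omega) hj
      have hmin := min_le_left (hpv dg (i+1) j) (hpv dg i (j+1))
      constructor
      · omega
      · omega
    · -- last column
      have hIH := IH (dg.length - (i+1) + (mOf dg - j)) (by omega) (i+1) j rfl (by omega) hj
      constructor
      · omega
      · omega
    · -- last row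
      have hIH := IH (dg.length - i + (mOf dg - (j+1))) (by omega) i (j+1) rfl hi (by omega)
      have hS' : Ssum (dg.drop i) (j+1)
          = loss ((rowOf dg i).drop (j+1)) + Ssum (dg.drop (i+1)) (j+1) := by
        rw [hdropi, Ssum_cons]
      have hmono := Ssum_mono (dg.drop (i+1)) j
      constructor
      · omega
      · omega
    · -- corner
      constructor
      · omega
      · omega

lemma row_fold_loss (r : List Int) : ∀ a : Int,
    r.foldl (fun hi d => if d < 0 then hi - d else hi) a = a + loss r := by
  induction r with
  | nil => intro a; simp [loss]
  | cons d r ih =>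
      intro a
      rw [List.foldl_cons, ih]
      have : loss (d :: r) = max 0 (-d) + loss r := by simp [loss]
      rw [this]
      by_cases hd : d < 0
      · rw [if_pos hd, max_eq_right (by omega : (0:Int) ≤ -d)]; ring
      · rw [if_neg hd, max_eq_left (by omega : -d ≤ (0:Int))]; ring

lemma hi_eq (dg : List (List Int)) :
    dg.foldl (fun hi row => row.foldl (fun hi d => if d < 0 then hi - d else hi) hi) 1
      = 1 + Ssum dg 0 := by
  suffices h : ∀ (l : List (List Int)) (a : Int),
      l.foldl (fun hi row => row.foldl (fun hi d => if d < 0 then hi - d else hi) hi) a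
        = a + Ssum l 0 by
    exact h dg 1
  intro l
  induction l with
  | nil => intro a; simp [Ssum]
  | cons r l ih =>
      intro a
      rw [List.foldl_cons, ih, row_fold_loss, Ssum_cons]
      rw [List.drop_zero]
      ring

lemma altSearch_eq (dg : List (List Int)) (nI mI : Int) (N : Int)
    (hfeas : ∀ y, 1 ≤ y → (altFeasible dg nI mI y = true ↔ N ≤ y)) :
    ∀ (k : Nat) (lo hi : Int), (hi - lo).toNat = k → 1 ≤ lo → lo ≤ N → N ≤ hi →
      altSearch dg nI mI lo hi = N := by
  intro k
  induction k using Nat.strong_induction_on with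
  | _ k IH =>
    intro lo hi hk h1 h2 h3
    rw [altSearch]
    by_cases hlh : lo < hi
    · rw [dif_pos hlh]
      have hb := PySem.Int.floordiv_two_mid_bounds (le_of_lt hlh)
      have hmidlt : PySem.Int.floordiv (lo + hi) 2 < hi :=
        (PySem.Int.floordiv_lt_iff_lt_mul (by omega)).2 (by omega)
      by_cases hf : altFeasible dg nI mI (PySem.Int.floordiv (lo + hi) 2) = true
      · rw [if_pos hf]
        have hN : N ≤ PySem.Int.floordiv (lo + hi) 2 :=
          (hfeas _ (by omega)).1 hf
        exact IH (PySem.Int.floordiv (lo + hi) 2 - lo).toNat (by omega) lo _ rfl h1 h2 hN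
      · rw [if_neg hf]
        have hN : PySem.Int.floordiv (lo + hi) 2 < N := by
          by_contra hcon
          push_neg at hcon
          exact hf ((hfeas _ (by omega)).2 hcon)
        exact IH (hi - (PySem.Int.floordiv (lo + hi) 2 + 1)).toNat (by omega) _ hi rfl
          (by omega) (by omega) h3
    · rw [dif_neg hlh]
      omega

theorem B_val (dungeon : List (List Int)) (hP : Rect dungeon) :
    calculateMinimumHPByDp_alt dungeon = hpv dungeon 0 0 := by
  have hn : 1 ≤ dungeon.length := by have := List.length_pos_iff.mpr hP.1; omega
  have hm : 1 ≤ mOf dungeon := hP.2.1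
  show altSearch dungeon (dungeon.length:Int) (((PySem.List.pyGetD dungeon 0 []).length:Nat):Int) 1
      (dungeon.foldl (fun hi row => row.foldl (fun hi d => if d < 0 then hi - d else hi) hi) 1)
    = hpv dungeon 0 0
  rw [mBridge dungeon, hi_eq]
  have h1le : 1 ≤ hpv dungeon 0 0 := need_ge_one _ _ _ _ _
  have hub : hpv dungeon 0 0 ≤ 1 + Ssum dungeon 0 := by
    have hb := hpv_bound dungeon hP (dungeon.length - 0 + (mOf dungeon - 0)) 0 0 rfl
      (by omega) (by omega)
    simpa using hb
  exact altSearch_eq dungeon _ _ (hpv dungeon 0 0)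
    (fun y hy => feas_iff dungeon y hP hy)
    ((1 + Ssum dungeon 0 - 1).toNat) 1 (1 + Ssum dungeon 0) rfl le_rfl h1le hub

-- ===== VERDICT (by name: the statement is the Claim_ definition above) =====
theorem calculateMinimumHPByDp_spec : Claim_equal_calculateMinimumHPByDp := by
  intro dungeon hDom hPre
  unfold Spec_calculateMinimumHPByDp
  have hP : Rect dungeon := hPre
  rw [A_val dungeon hP, B_val dungeon hP]
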